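-- pv_equiv track=rewrite | github.com/ironsj/MTH225-Assignments | CodingAssignment8.py | constSequence
-- ===== SOURCE A (Python) =====
-- def constSequence(seq):  # creates cosntSequence with seq as input
--     diffList1 = []  # creates empty list
--     diffList2 = []  # creates empty list
--     index1 = 1  # sets index to 1
--     index2 = 1  # sets index to 1
--     constList = []  # creates empty list
--     while (index1 < len(seq)):  # goes through each elements in seq
--         diffList1.append(seq[index1] - seq[index1 - 1])  # adds the difference of each element and the element before
--         index1 += 1  # increments the index
--     while (index2 < len(diffList1)):  # goes through each element in diffList1
--         diffList2.append(
--             diffList1[index2] - diffList1[index2 - 1])  # adds the difference of each element and the element before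
--         index2 += 1  # increments the index
--     for element in diffList2:  # goes through each element in diffList 2
--         if element not in constList:  # creates condition that the element must be unique
--             constList.append(element)  # adds unique element to constList
--     if (len(constList) == 1):  # sets condition that constList size must be 1
--         return True  # returns true if condition holds true
--     return False  # returns false otherwise
-- ===== SOURCE B (Python) =====
-- def constSequence(seq):
--     # One pass: True iff there is at least one second difference and all are equal.
--     if len(seq) < 3:
--         return False
--     d = seq[2] - 2 * seq[1] + seq[0]
--     return all(c - 2 * b + a == d for a, b, c in zip(seq, seq[1:], seq[2:]))
-- ===== Notes on version B (the rewrite author's own statement) =====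
-- stated objective: faster
-- what changed: Instead of materialising the first- and second-difference lists and deduplicating the latter with a quadratic 'not in' membership scan, B makes one zip pass over the sequence checking every second difference against the first one.
import Mathlib
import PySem

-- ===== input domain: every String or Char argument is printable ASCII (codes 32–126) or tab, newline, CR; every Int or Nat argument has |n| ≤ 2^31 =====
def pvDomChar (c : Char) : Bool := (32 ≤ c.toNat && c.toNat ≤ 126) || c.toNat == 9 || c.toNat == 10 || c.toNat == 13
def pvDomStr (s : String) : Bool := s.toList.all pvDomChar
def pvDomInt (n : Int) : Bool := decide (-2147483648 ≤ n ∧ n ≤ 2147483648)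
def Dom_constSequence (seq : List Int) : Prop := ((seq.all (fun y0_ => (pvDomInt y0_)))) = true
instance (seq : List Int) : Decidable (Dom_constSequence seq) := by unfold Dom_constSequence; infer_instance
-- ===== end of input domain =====

-- B replaces A's two materialised difference lists plus quadratic dedup scan by one zip pass
-- comparing every second difference to the first one (objective: faster).


-- ===== PORT A =====
def constSequence (seq : List Int) : Bool :=
  let diffList1 := (PySem.List.pyRange 1 (seq.length : Int) 1).foldl
    (fun acc i => acc ++ [PySem.List.pyGetD seq i 0 - PySem.List.pyGetD seq (i - 1) 0]) []
  let diffList2 := (PySem.List.pyRange 1 (diffList1.length : Int) 1).foldl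
    (fun acc i => acc ++ [PySem.List.pyGetD diffList1 i 0 - PySem.List.pyGetD diffList1 (i - 1) 0]) []
  let constList := diffList2.foldl (fun cl e => if e ∈ cl then cl else cl ++ [e]) []
  constList.length == 1

-- ===== PORT B =====
def constSequence_alt (seq : List Int) : Bool :=
  if seq.length < 3 then false
  else
    let d := PySem.List.pyGetD seq 2 0 - 2 * PySem.List.pyGetD seq 1 0 + PySem.List.pyGetD seq 0 0
    ((seq.zip (PySem.List.slice seq (some 1) none)).zip (PySem.List.slice seq (some 2) none)).all
      (fun t => t.2 - 2 * t.1.2 + t.1.1 == d)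

-- ===== PRECONDITION & SPEC =====
def Spec_constSequence (seq : List Int) (out : Bool) : Prop := out = constSequence_alt seq
instance (seq : List Int) (out : Bool) : Decidable (Spec_constSequence seq out) := by unfold Spec_constSequence; infer_instance

-- ===== CLAIM (what is proved, stated in full; the proofs are below) =====
def Claim_equal_constSequence : Prop := ∀ (seq : List Int), Dom_constSequence seq → Spec_constSequence seq (constSequence seq)

-- ===== LEMMAS AND PROOFS =====

def step (cl : List Int) (e : Int) : List Int := if e ∈ cl then cl else cl ++ [e]

theorem dedup_len_le (L : List Int) (cl : List Int) : cl.length ≤ (L.foldl step cl).length := by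
  induction L generalizing cl with
  | nil => simp
  | cons x t ih =>
    simp only [List.foldl_cons]
    unfold step
    split_ifs with h
    · exact ih cl
    · calc cl.length ≤ (cl ++ [x]).length := by simp
        _ ≤ _ := ih _

theorem dedup_single (t : List Int) (a : Int) :
    ((t.foldl step [a]).length == 1) = t.all (fun x => x == a) := by
  induction t with
  | nil => simp
  | cons x t ih =>
    simp only [List.foldl_cons, List.all_cons]
    by_cases h : x = a
    · subst h
      have : step [x] x = [x] := by simp [step]
      rw [this, ih]; simp
    · have hs : step [a] x = [a, x] := by simp [step, h]
      rw [hs]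
      have h2 : 2 ≤ ((t.foldl step [a, x]).length) := dedup_len_le t [a, x]
      have : ((t.foldl step [a, x]).length == 1) = false := by
        simp only [beq_eq_false_iff_ne]; omega
      rw [this]
      simp [h]

theorem diffFold (xs : List Int) :
    (PySem.List.pyRange 1 (xs.length : Int) 1).foldl
      (fun acc i => acc ++ [PySem.List.pyGetD xs i 0 - PySem.List.pyGetD xs (i - 1) 0]) []
    = (List.range (xs.length - 1)).map (fun k => xs.getD (k + 1) 0 - xs.getD k 0) := by
  rw [PySem.List.foldl_append_singleton_eq_map, PySem.List.pyRange_one]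
  rw [List.map_map]
  have hlen : ((xs.length : Int) - 1).toNat = xs.length - 1 := by omega
  rw [hlen]
  apply List.map_congr_left
  intro k hk
  simp only [Function.comp]
  have h1 : (1 : Int) + (k : Int) = ((k + 1 : Nat) : Int) := by push_cast; ring
  rw [h1]
  have h2 : ((k + 1 : Nat) : Int) - 1 = ((k : Nat) : Int) := by push_cast; ring
  rw [h2, PySem.List.pyGetD_natCast, PySem.List.pyGetD_natCast]

theorem zipL_eq (seq : List Int) :
    (seq.zip (seq.drop 1)).zip (seq.drop 2)
    = (List.range (seq.length - 2)).map
        (fun k => ((seq.getD k 0, seq.getD (k + 1) 0), seq.getD (k + 2) 0)) := by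
  apply List.ext_getElem
  · simp; omega
  · intro i h1 h2
    have hlen : i < seq.length - 2 := by simpa using h2
    have hi : i < seq.length := by omega
    have hi1 : i + 1 < seq.length := by omega
    have hi2 : i + 2 < seq.length := by omega
    simp [List.getElem_zip, hi, hi1, hi2]
    congr 1
    omega

theorem pyGetD_two (seq : List Int) : PySem.List.pyGetD seq 2 0 = seq.getD 2 0 := by
  rw [show (2:Int) = ((2:Nat):Int) by norm_num, PySem.List.pyGetD_natCast]
theorem pyGetD_one (seq : List Int) : PySem.List.pyGetD seq 1 0 = seq.getD 1 0 := by
  rw [show (1:Int) = ((1:Nat):Int) by norm_num, PySem.List.pyGetD_natCast]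
theorem pyGetD_zero (seq : List Int) : PySem.List.pyGetD seq 0 0 = seq.getD 0 0 := by
  rw [show (0:Int) = ((0:Nat):Int) by norm_num, PySem.List.pyGetD_natCast]

theorem constSequence_main (seq : List Int) : constSequence seq = constSequence_alt seq := by
  unfold constSequence constSequence_alt
  dsimp only
  rw [diffFold seq, diffFold]
  rw [PySem.List.slice_from seq (a := 1) (by norm_num), PySem.List.slice_from seq (a := 2) (by norm_num)]
  rw [show Int.toNat 1 = 1 from rfl, show Int.toNat 2 = 2 from rfl]
  rw [zipL_eq, List.all_map, pyGetD_two, pyGetD_one, pyGetD_zero]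
  simp only [List.length_map, List.length_range]
  -- rewrite inner getDs of the second difference list
  have hmap : (List.range (seq.length - 1 - 1)).map
      (fun k => ((List.range (seq.length - 1)).map (fun j => seq.getD (j + 1) 0 - seq.getD j 0)).getD (k + 1) 0
              - ((List.range (seq.length - 1)).map (fun j => seq.getD (j + 1) 0 - seq.getD j 0)).getD k 0)
      = (List.range (seq.length - 2)).map
      (fun k => (seq.getD (k + 2) 0 - seq.getD (k + 1) 0) - (seq.getD (k + 1) 0 - seq.getD k 0)) := by
    rw [show seq.length - 1 - 1 = seq.length - 2 by omega]
    apply List.map_congr_left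
    intro k hk
    have hk' : k < seq.length - 2 := List.mem_range.mp hk
    rw [PySem.List.getD_map_range _ _ _ _ (by omega), PySem.List.getD_map_range _ _ _ _ (by omega)]
  rw [hmap]
  by_cases hlt : seq.length < 3
  · rw [if_pos hlt, show seq.length - 2 = 0 by omega]
    simp
  · rw [if_neg hlt]
    obtain ⟨m', hm⟩ : ∃ m', seq.length - 2 = m' + 1 := ⟨seq.length - 3, by omega⟩
    rw [hm, List.range_succ_eq_map, List.map_cons, List.foldl_cons, List.all_cons, List.map_map]
    have hstep : (if ((seq.getD (0+2) 0 - seq.getD (0+1) 0) - (seq.getD (0+1) 0 - seq.getD 0 0)) ∈ ([] : List Int)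
        then ([] : List Int) else [] ++ [((seq.getD (0+2) 0 - seq.getD (0+1) 0) - (seq.getD (0+1) 0 - seq.getD 0 0))])
        = [((seq.getD (0+2) 0 - seq.getD (0+1) 0) - (seq.getD (0+1) 0 - seq.getD 0 0))] := by simp
    rw [hstep]
    rw [show (List.foldl (fun cl e => if e ∈ cl then cl else cl ++ [e])) = List.foldl step from rfl]
    rw [dedup_single, List.all_map]
    simp only [Function.comp, List.all_map]
    rw [show (seq.getD (0+2) 0 - 2 * seq.getD (0+1) 0 + seq.getD 0 0 == seq.getD 2 0 - 2 * seq.getD 1 0 + seq.getD 0 0) = true by simp, Bool.true_and]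
    · congr 1
      funext k
      simp only [Function.comp, Nat.succ_eq_add_one]
      congr 1 <;> ring

-- ===== VERDICT (by name: the statement is the Claim_ definition above) =====
theorem constSequence_spec : Claim_equal_constSequence := by
  intro seq _
  exact constSequence_main seq
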